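-- pv_equiv track=rewrite | github.com/ecbush/xenoGI | scores.py | getPossibleGenesD
-- ===== SOURCE A (Python) =====
-- def getPossibleGenesD(rHitsL):
--     '''return dict containing an entry for each gene in species 0 that has
--     a best reciprocal hit in all other species.  format of an entry is
--     gene:(tuple of recip hit genes in other species). We do this to
--     quickly eliminate things we aren't interested in.
--     '''
--     possibleGenesD = {}
--     firstRow = rHitsL[0]
--     firstDict = firstRow[1]
--     # we just look at first dict, since the all around brh sets will
--     # have a gene in this with matches in all strains.
--     for gene in firstDict:
--         isPossible = True
--         hitsL = [firstDict[gene]]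
--         for colInd in range(2, len(firstRow)):
--             compareDict = firstRow[colInd]
--             hit = compareDict.get(gene)
--             if hit == None:
--                 isPossible = False
--                 break
--             else:
--                 hitsL.append(hit)
--         if isPossible:
--             possibleGenesD[gene] = tuple(hitsL)
--     return possibleGenesD
-- ===== SOURCE B (Python) =====
-- def getPossibleGenesD(rHitsL):
--     firstRow = rHitsL[0]
--     firstDict = firstRow[1]
--     cols = firstRow[2:]
--     # survivor set: genes of species 0 with a (non-None) hit in every other species
--     survivors = {g for g in firstDict if all(d.get(g) is not None for d in cols)}
--     possibleGenesD = {}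
--     for g in firstDict:
--         if g in survivors:
--             possibleGenesD[g] = (firstDict[g],) + tuple(d[g] for d in cols)
--     return possibleGenesD
-- ===== Notes on version B (the rewrite author's own statement) =====
-- stated objective: alternative
-- what changed: Replaces the single pass with an incremental hits list and a break-on-missing flag by two separate passes: first a survivor set built by one comprehension over all compare dicts, then a tuple-building pass over firstDict restricted to survivors.
import Mathlib
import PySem

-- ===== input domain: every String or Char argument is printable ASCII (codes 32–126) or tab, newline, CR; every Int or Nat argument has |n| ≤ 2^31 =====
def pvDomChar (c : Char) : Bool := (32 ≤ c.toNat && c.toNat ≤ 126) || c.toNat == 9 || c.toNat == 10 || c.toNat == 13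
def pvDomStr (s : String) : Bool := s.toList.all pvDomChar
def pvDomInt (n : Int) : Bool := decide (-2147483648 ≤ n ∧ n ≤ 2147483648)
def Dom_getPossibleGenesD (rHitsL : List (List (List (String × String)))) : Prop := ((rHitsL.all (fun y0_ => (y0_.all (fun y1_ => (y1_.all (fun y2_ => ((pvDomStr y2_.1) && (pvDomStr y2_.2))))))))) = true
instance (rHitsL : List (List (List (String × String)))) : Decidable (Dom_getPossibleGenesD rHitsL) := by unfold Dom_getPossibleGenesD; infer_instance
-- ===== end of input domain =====

-- B replaces A's single pass (incremental hits list + break-on-missing flag) by a survivor set built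
-- in one comprehension over all compare dicts followed by a separate tuple-building pass (alternative
-- decomposition, same cost).


-- ===== PORT A =====
-- inner loop 'for colInd in range(2, len(firstRow)): … break' with state hitsL; none = broke out
def aLoop (firstRow : List (List (String × String))) (gene : String) :
    List Int → List String → Option (List String)
  | [], hitsL => some hitsL
  | colInd :: rest, hitsL =>
    let compareDict := PySem.Dict.ofList ((PySem.List.pyGet? firstRow colInd).getD [])
    match compareDict.get? gene with
    | none => none
    | some hit => aLoop firstRow gene rest (hitsL ++ [hit])

def getPossibleGenesD (rHitsL : List (List (List (String × String)))) : List (String × List String) :=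
  let firstRow := (PySem.List.pyGet? rHitsL 0).getD []
  let firstDict := PySem.Dict.ofList ((PySem.List.pyGet? firstRow 1).getD [])
  (firstDict.keys.foldl (fun possibleGenesD gene =>
      match aLoop firstRow gene (PySem.List.pyRange 2 firstRow.length)
              [(firstDict.get? gene).getD ""] with
      | none => possibleGenesD                          -- isPossible was set False
      | some hitsL => possibleGenesD.insert gene hitsL)
    (PySem.Dict.empty)).items

-- ===== PORT B =====
def getPossibleGenesD_alt (rHitsL : List (List (List (String × String)))) : List (String × List String) :=
  let firstRow := (PySem.List.pyGet? rHitsL 0).getD []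
  let firstDict := PySem.Dict.ofList ((PySem.List.pyGet? firstRow 1).getD [])
  let cols := (PySem.List.slice firstRow (some 2) none).map PySem.Dict.ofList
  let survivors : PySem.Set String :=
    PySem.Set.ofList (firstDict.keys.filter (fun g => cols.all (fun d => (d.get? g).isSome)))
  (firstDict.keys.foldl (fun possibleGenesD g =>
      if survivors.contains g then
        possibleGenesD.insert g
          ((firstDict.get? g).getD "" :: cols.map (fun d => (d.get? g).getD ""))
      else possibleGenesD)
    (PySem.Dict.empty)).items

-- ===== PRECONDITION & SPEC =====
-- Pre_ excludes exactly the inputs where the Python A raises IndexError: an empty rHitsL (rHitsL[0])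
-- or a first row with fewer than two entries (firstRow[1]).
def Pre_getPossibleGenesD (rHitsL : List (List (List (String × String)))) : Prop :=
  rHitsL ≠ [] ∧ 2 ≤ (rHitsL.headD []).length
instance (rHitsL : List (List (List (String × String)))) : Decidable (Pre_getPossibleGenesD rHitsL) := by
  unfold Pre_getPossibleGenesD; infer_instance
def pvWitness_getPossibleGenesD : (List (List (List (String × String)))) :=
  [[[], [("g1", "h1"), ("g2", "h2")]]]
def Spec_getPossibleGenesD (rHitsL : List (List (List (String × String)))) (out : List (String × List String)) : Prop := out = getPossibleGenesD_alt rHitsL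
instance (rHitsL : List (List (List (String × String)))) (out : List (String × List String)) : Decidable (Spec_getPossibleGenesD rHitsL out) := by unfold Spec_getPossibleGenesD; infer_instance

-- ===== CLAIM (what is proved, stated in full; the proofs are below) =====
def Claim_equal_getPossibleGenesD : Prop := ∀ (rHitsL : List (List (List (String × String)))), Dom_getPossibleGenesD rHitsL → Pre_getPossibleGenesD rHitsL → Spec_getPossibleGenesD rHitsL (getPossibleGenesD rHitsL)

-- ===== LEMMAS AND PROOFS =====

-- A's inner loop over range(k, len(firstRow)) equals the all-present test plus map over drop k
lemma aLoop_eq (firstRow : List (List (String × String))) (gene : String) :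
    ∀ (n k : Nat) (hits : List String), firstRow.length - k = n →
      aLoop firstRow gene (PySem.List.pyRange k firstRow.length) hits =
        (if ((firstRow.drop k).map PySem.Dict.ofList).all (fun d => (d.get? gene).isSome)
         then some (hits ++ ((firstRow.drop k).map PySem.Dict.ofList).map
                      (fun d => (d.get? gene).getD ""))
         else none) := by
  intro n
  induction n with
  | zero =>
    intro k hits h
    have hk : firstRow.length ≤ k := by omega
    rw [PySem.List.pyRange_one_eq_nil (by exact_mod_cast hk),
        List.drop_eq_nil_of_le hk]
    simp [aLoop]
  | succ n ih =>
    intro k hits h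
    have hk : k < firstRow.length := by omega
    rw [PySem.List.pyRange_one_cons (by exact_mod_cast hk)]
    have hd : firstRow.drop k = firstRow[k] :: firstRow.drop (k + 1) :=
      List.drop_eq_getElem_cons hk
    have hget : PySem.List.pyGet? firstRow (k : Int) = some firstRow[k] := by
      simp [PySem.List.pyGet?_natCast, List.getElem?_eq_getElem hk]
    have hcast : ((k : Int) + 1) = ((k + 1 : Nat) : Int) := by push_cast; ring
    simp only [aLoop, hget, Option.getD_some]
    have hd' : (firstRow.drop k).map PySem.Dict.ofList =
        PySem.Dict.ofList firstRow[k] :: (firstRow.drop (k + 1)).map PySem.Dict.ofList := by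
      rw [hd, List.map_cons]
    cases hc : (PySem.Dict.ofList firstRow[k]).get? gene with
    | none =>
      rw [hd', List.all_cons, hc]
      rfl
    | some hit =>
      dsimp only
      rw [hcast, ih (k + 1) (hits ++ [hit]) (by omega), hd', List.all_cons, hc]
      simp only [Option.isSome_some, Bool.true_and, List.map_cons,
        List.append_assoc, List.singleton_append]
      rw [hc]; rfl

theorem getPossibleGenesD_spec : Claim_equal_getPossibleGenesD := by
  intro rHitsL _ _
  unfold Spec_getPossibleGenesD getPossibleGenesD getPossibleGenesD_alt
  dsimp only
  set firstRow := (PySem.List.pyGet? rHitsL 0).getD [] with hfr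
  set firstDict := PySem.Dict.ofList ((PySem.List.pyGet? firstRow 1).getD []) with hfd
  rw [PySem.List.slice_from firstRow (by norm_num : (0:Int) ≤ 2)]
  simp only [show (2:Int).toNat = 2 from rfl]
  congr 1
  apply PySem.List.foldl_congr_mem
  intro acc g hg
  have hA := aLoop_eq firstRow g (firstRow.length - 2) 2 [(firstDict.get? g).getD ""] rfl
  simp only [Nat.cast_ofNat] at hA
  rw [hA]
  have hmem : (PySem.Set.ofList (firstDict.keys.filter
        (fun g => ((firstRow.drop 2).map PySem.Dict.ofList).all
          (fun d => (d.get? g).isSome)))).contains g =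
      ((firstRow.drop 2).map PySem.Dict.ofList).all (fun d => (d.get? g).isSome) := by
    rw [PySem.Set.contains_eq_decide]
    by_cases hall : ((firstRow.drop 2).map PySem.Dict.ofList).all
        (fun d => (d.get? g).isSome) = true
    · rw [hall, decide_eq_true_eq, PySem.Set.mem_ofList]
      exact List.mem_filter.mpr ⟨hg, hall⟩
    · rw [Bool.not_eq_true] at hall
      rw [hall, decide_eq_false_iff_not, PySem.Set.mem_ofList]
      intro hmemf
      exact absurd (List.mem_filter.mp hmemf).2 (by rw [hall]; exact Bool.false_ne_true)
  rw [hmem]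
  by_cases hall : ((firstRow.drop 2).map PySem.Dict.ofList).all
      (fun d => (d.get? g).isSome) = true
  · rw [if_pos hall, if_pos hall]; rfl
  · rw [Bool.not_eq_true] at hall
    rw [if_neg (by rw [hall]; exact Bool.false_ne_true),
        if_neg (by rw [hall]; exact Bool.false_ne_true)]
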